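-- pv_equiv track=rewrite | github.com/rwillingeprins/advent_of_code | 2019/day04b.py | has_double
-- ===== SOURCE A (Python) =====
-- def has_double(values):
--     previous_value = values[0]
--     n_duplicates = 0
--     for value in values[1:]:
--         if value == previous_value:
--             n_duplicates += 1
--         elif n_duplicates == 1:
--             break
--         else:
--             n_duplicates = 0
--         previous_value = value
--     return n_duplicates == 1
-- ===== SOURCE B (Python) =====
-- def has_double(values):
--     # Consume the list run by run: measure the leading run, succeed if its
--     # length is exactly 2, otherwise drop it and repeat.
--     xs = values
--     while xs:
--         head = xs[0]
--         k = 1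
--         while k < len(xs) and xs[k] == head:
--             k += 1
--         if k == 2:
--             return True
--         xs = xs[k:]
--     return False
-- ===== Notes on version B (the rewrite author's own statement) =====
-- stated objective: alternative
-- what changed: B consumes the list run by run (measure the leading run, test whether its length is exactly 2, drop it and repeat) instead of A's single pass with a running duplicate counter and break logic; Pre_ excludes only the empty list, on which A raises IndexError.
import Mathlib
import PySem

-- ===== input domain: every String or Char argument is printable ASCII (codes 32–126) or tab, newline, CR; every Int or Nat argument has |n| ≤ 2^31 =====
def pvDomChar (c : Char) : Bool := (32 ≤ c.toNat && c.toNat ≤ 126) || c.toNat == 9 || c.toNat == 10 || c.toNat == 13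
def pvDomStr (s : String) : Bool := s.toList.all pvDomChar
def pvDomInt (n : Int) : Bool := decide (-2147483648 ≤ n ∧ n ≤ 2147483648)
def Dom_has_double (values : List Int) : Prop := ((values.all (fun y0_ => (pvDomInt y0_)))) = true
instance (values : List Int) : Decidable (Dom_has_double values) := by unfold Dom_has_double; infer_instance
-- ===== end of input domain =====

-- B consumes the list run by run (measure the leading run, test its length,
-- drop it, recurse) instead of A's running duplicate counter with break logic.

-- ===== PORT A =====
-- A's for-loop over values[1:] carrying (previous_value, n_duplicates), with break.
def hasDoubleLoopA : List Int → Int → Int → Int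
  | [], _, n => n
  | v :: vs, prev, n =>
    if v = prev then hasDoubleLoopA vs v (n + 1)
    else if n = 1 then n            -- break
    else hasDoubleLoopA vs v 0

def has_double (values : List Int) : Bool :=
  match values with
  | [] => false                      -- Python raises IndexError here (outside Pre_)
  | v0 :: rest => decide (hasDoubleLoopA rest v0 0 = 1)

-- ===== PORT B =====
-- inner while: number of further elements equal to head at the front of the list
def countRun (head : Int) : List Int → Nat
  | [] => 0
  | x :: rest => if x = head then countRun head rest + 1 else 0

-- outer while: leading run of length 2 → True, otherwise drop the run and repeat
def runScan : List Int → Bool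
  | [] => false
  | x :: rest =>
    let c := countRun x rest         -- k = c + 1 in Source B
    if c + 1 = 2 then true else runScan (rest.drop c)
termination_by xs => xs.length
decreasing_by simp [List.length_drop]

def has_double_alt (values : List Int) : Bool := runScan values

-- ===== PRECONDITION & SPEC =====
-- Pre_ excludes only the empty list, on which Python A raises IndexError (values[0]).
def Pre_has_double (values : List Int) : Prop := values ≠ []
instance (values : List Int) : Decidable (Pre_has_double values) := by unfold Pre_has_double; infer_instance
def pvWitness_has_double : List Int := [1, 1, 2]

def Spec_has_double (values : List Int) (out : Bool) : Prop := out = has_double_alt values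
instance (values : List Int) (out : Bool) : Decidable (Spec_has_double values out) := by unfold Spec_has_double; infer_instance

-- ===== CLAIM (what is proved, stated in full; the proofs are below) =====
def Claim_equal_has_double : Prop := ∀ (values : List Int), Dom_has_double values → Pre_has_double values → Spec_has_double values (has_double values)

-- ===== LEMMAS AND PROOFS =====
-- Proof-only helper: the run-length partition both programs implicitly explore.
def runLengths : List Int → Int → Int → List Int
  | [], _, c => [c]
  | v :: vs, prev, c =>
    if v = prev then runLengths vs prev (c + 1)
    else c :: runLengths vs v 1

-- A's counter n is the current run length minus one, so A finishing with
-- n = 1 coincides with "2 is among the run lengths".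
theorem hasDouble_loop_runs (rest : List Int) : ∀ (prev n : Int),
    hasDoubleLoopA rest prev n = 1 ↔ 2 ∈ runLengths rest prev (n + 1) := by
  induction rest with
  | nil =>
    intro prev n
    simp only [hasDoubleLoopA, runLengths, List.mem_singleton]
    omega
  | cons v vs ih =>
    intro prev n
    by_cases h : v = prev
    · subst h
      simp only [hasDoubleLoopA, runLengths, if_true]
      have := ih v (n + 1)
      rw [show n + 1 + 1 = n + 1 + 1 by ring] at this
      exact this
    · by_cases h1 : n = 1
      · subst h1
        simp only [hasDoubleLoopA, runLengths, if_neg h, if_true, List.mem_cons]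
        constructor
        · intro _; left; norm_num
        · intro _; trivial
      · simp only [hasDoubleLoopA, runLengths, if_neg h, if_neg h1, List.mem_cons]
        rw [ih v 0]
        constructor
        · intro hm; right; simpa using hm
        · rintro (h2 | hm)
          · omega
          · simpa using hm

-- runLengths unfolds one whole run at a time, via countRun / drop.
theorem runLengths_split (rest : List Int) : ∀ (prev c : Int),
    runLengths rest prev c =
      (match rest.drop (countRun prev rest) with
       | [] => [c + countRun prev rest]
       | y :: ys => (c + (countRun prev rest : Int)) :: runLengths ys y 1) := by
  induction rest with
  | nil => intro prev c; simp [runLengths, countRun]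
  | cons v vs ih =>
    intro prev c
    by_cases h : v = prev
    · subst h
      simp only [runLengths, countRun, if_true]
      rw [ih v (c + 1)]
      simp only [List.drop_succ_cons]
      cases vs.drop (countRun v vs) with
      | nil => simp; omega
      | cons y ys => simp; omega
    · simp [runLengths, countRun, if_neg h]

-- B's run-by-run scan tests exactly "2 is among the run lengths".
theorem runScan_runs_aux : ∀ (n : Nat) (x : Int) (rest : List Int), rest.length < n →
    (runScan (x :: rest) = true ↔ 2 ∈ runLengths rest x 1) := by
  intro n
  induction n with
  | zero => intro x rest h; omega
  | succ n ih =>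
    intro x rest hlen
    rw [runScan, runLengths_split]
    by_cases hc : countRun x rest + 1 = 2
    · have h1 : (1 : Int) + (countRun x rest : Int) = 2 := by omega
      cases hdrop : rest.drop (countRun x rest) with
      | nil => simp [hc, h1]
      | cons y ys => simp [hc, h1]
    · have h1 : (1 : Int) + (countRun x rest : Int) ≠ 2 := by omega
      cases hdrop : rest.drop (countRun x rest) with
      | nil => simp [hc, runScan]; omega
      | cons y ys =>
        have hys : ys.length < n := by
          have := List.length_drop (l := rest) (i := countRun x rest)
          rw [hdrop] at this
          simp at this
          omega
        simp only [hc, if_false, List.mem_cons]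
        rw [ih y ys hys]
        constructor
        · intro h; right; exact h
        · rintro (h | h)
          · exact absurd h.symm h1
          · exact h

theorem runScan_runs (x : Int) (rest : List Int) :
    runScan (x :: rest) = true ↔ 2 ∈ runLengths rest x 1 :=
  runScan_runs_aux (rest.length + 1) x rest (Nat.lt_succ_self _)

-- ===== VERDICT (by name: the statement is the Claim_ definition above) =====
theorem has_double_spec : Claim_equal_has_double := by
  intro values _ hpre
  unfold Spec_has_double
  match values with
  | [] => exact absurd rfl hpre
  | v0 :: rest =>
    show decide (hasDoubleLoopA rest v0 0 = 1) = runScan (v0 :: rest)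
    have hA := hasDouble_loop_runs rest v0 0
    rw [show (0 : Int) + 1 = 1 by norm_num] at hA
    have hB := runScan_runs v0 rest
    rw [Bool.eq_iff_iff, decide_eq_true_iff]
    exact hA.trans hB.symm
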